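-- pv_equiv track=rewrite | github.com/snigdhardy/Project-CS108 | path.py | dfs
-- ===== SOURCE A (Python) =====
-- def is_valid_move(grid, visited, row, col):
--     rows = len(grid)
--     cols = len(grid[0])
--     return (1 <= row < rows - 1) and (1 <= col < cols - 1) and (grid[row][col] == '0') and not visited[row][col]
--
-- def dfs(grid, visited, row, col, path):
--     if row == len(grid) - 2 and col == len(grid[0]) - 2:
--         return True
--
--     if is_valid_move(grid, visited, row, col):
--         visited[row][col] = True
--
--         # Check right
--         if dfs(grid, visited, row, col + 1, path):
--             path.append('R')
--             return True
--
--         # Check down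
--         if dfs(grid, visited, row + 1, col, path):
--             path.append('D')
--             return True
--
--         # Check left
--         if dfs(grid, visited, row, col - 1, path):
--             path.append('L')
--             return True
--
--         # Check up
--         if dfs(grid, visited, row - 1, col, path):
--             path.append('U')
--             return True
--
--         return False
-- ===== SOURCE B (Python) =====
-- def is_valid_move(grid, visited, row, col):
--     rows = len(grid)
--     cols = len(grid[0])
--     return (1 <= row < rows - 1) and (1 <= col < cols - 1) and (grid[row][col] == '0') and not visited[row][col]
--
-- def dfs(grid, visited, row, col, path):
--     # Iterative DFS: explicit stack with parent links instead of recursion.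
--     # Mutates visited and path exactly as the recursive version does.
--     tr, tc = len(grid) - 2, len(grid[0]) - 2
--     if row == tr and col == tc:
--         return True
--     if not is_valid_move(grid, visited, row, col):
--         return None
--     parent = {}
--     stack = [(row, col, None)]
--     while stack:
--         r, c, link = stack.pop()
--         if r == tr and c == tc:
--             # walk back to the start, appending moves in reverse travel order
--             while link is not None:
--                 pr, pc, mv = link
--                 path.append(mv)
--                 link = parent[(pr, pc)]
--             return True
--         if not is_valid_move(grid, visited, r, c):
--             continue
--         visited[r][c] = True
--         parent[(r, c)] = link
--         # push U, L, D, R so that R is explored first, as the recursion does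
--         stack.append((r - 1, c, (r, c, 'U')))
--         stack.append((r, c - 1, (r, c, 'L')))
--         stack.append((r + 1, c, (r, c, 'D')))
--         stack.append((r, c + 1, (r, c, 'R')))
--     return False
-- ===== Notes on version B (the rewrite author's own statement) =====
-- stated objective: alternative
-- what changed: The recursive four-way DFS is replaced by an iterative search with an explicit stack (neighbours pushed in U,L,D,R order so R is explored first) and parent links from which the move path is reconstructed at the target, instead of being appended call-by-call while the recursion unwinds. Pre_ excludes inputs where A raises IndexError (empty grid, or ragged/mis-shaped grid/visited whose short rows the search touches) and, conservatively, ragged shapes on which the search happens to stay on well-formed cells (see cite).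
import Mathlib
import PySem

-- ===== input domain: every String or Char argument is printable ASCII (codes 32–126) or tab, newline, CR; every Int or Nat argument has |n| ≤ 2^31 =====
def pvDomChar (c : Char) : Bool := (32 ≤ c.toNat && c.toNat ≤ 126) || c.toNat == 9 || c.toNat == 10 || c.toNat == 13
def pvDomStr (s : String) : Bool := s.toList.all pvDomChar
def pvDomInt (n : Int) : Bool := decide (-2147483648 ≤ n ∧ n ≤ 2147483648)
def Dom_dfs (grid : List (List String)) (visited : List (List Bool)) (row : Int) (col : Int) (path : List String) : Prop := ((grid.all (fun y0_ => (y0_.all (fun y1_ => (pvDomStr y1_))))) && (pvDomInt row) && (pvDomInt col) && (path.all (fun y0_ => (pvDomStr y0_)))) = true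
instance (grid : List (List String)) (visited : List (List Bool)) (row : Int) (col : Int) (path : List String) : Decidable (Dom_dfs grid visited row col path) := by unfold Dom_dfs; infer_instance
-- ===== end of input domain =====

-- B replaces the recursive DFS by an explicit-stack search with parent links (alternative decomposition,
-- same cost). Both Pythons mutate `visited` and `path` identically; the equivalence proved here is about
-- the RETURN value only, so the ports thread the `visited` state (it determines the result) while the
-- append-only `path`/parent bookkeeping, which the return value never reads, is modelled on the A side
-- and omitted from B's loop.

-- ===== PORT A =====
-- number of unvisited (False) flags; used only as fuel for A's recursion (the fuel below never runs out)
def countFalse (v : List (List Bool)) : Nat := (v.map (fun row => row.count false)).sum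

-- grid[row][col]; Python raises on an out-of-range access (outside Pre_), where this defaults
def gridCell (g : List (List String)) (r c : Int) : String :=
  ((PySem.List.pyGet? g r).bind (fun row => PySem.List.pyGet? row c)).getD ""

-- visited[row][col]; Python raises out of range (outside Pre_); default `true` = treated as visited
def visCell (v : List (List Bool)) (r c : Int) : Bool :=
  ((PySem.List.pyGet? v r).bind (fun row => PySem.List.pyGet? row c)).getD true

-- visited[row][col] = True; Python raises out of range (outside Pre_), where this is a no-op
def mark (v : List (List Bool)) (r c : Int) : List (List Bool) :=
  PySem.List.pySetD v r (PySem.List.pySetD (PySem.List.pyGetD v r []) c true)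

-- is_valid_move(grid, visited, row, col)  (len(grid[0]) defaults through headD; grid = [] raises in Python, outside Pre_)
def isValidMove (g : List (List String)) (v : List (List Bool)) (row col : Int) : Bool :=
  (decide (1 ≤ row ∧ row < (g.length : Int) - 1)) &&
  (decide (1 ≤ col ∧ col < ((g.headD []).length : Int) - 1)) &&
  (gridCell g row col == "0") && !(visCell v row col)

-- dfs(grid, visited, row, col, path), state-threaded: returns (result, visited, path);
-- fuel = countFalse visited + 1 bounds the recursion depth and is never exhausted (each descent marks a cell)
def dfsAF (g : List (List String)) : Nat → List (List Bool) → Int → Int → List String → Option Bool × List (List Bool) × List String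
  | 0, v, _, _, path => (none, v, path)
  | fuel+1, v, row, col, path =>
    if row = (g.length : Int) - 2 ∧ col = ((g.headD []).length : Int) - 2 then (some true, v, path)
    else if isValidMove g v row col then
      let R := dfsAF g fuel (mark v row col) row (col+1) path
      if R.1 = some true then (some true, R.2.1, R.2.2 ++ ["R"])
      else
        let D := dfsAF g fuel R.2.1 (row+1) col R.2.2
        if D.1 = some true then (some true, D.2.1, D.2.2 ++ ["D"])
        else
          let L := dfsAF g fuel D.2.1 row (col-1) D.2.2
          if L.1 = some true then (some true, L.2.1, L.2.2 ++ ["L"])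
          else
            let U := dfsAF g fuel L.2.1 (row-1) col L.2.2
            if U.1 = some true then (some true, U.2.1, U.2.2 ++ ["U"])
            else (some false, U.2.1, U.2.2)
    else (none, v, path)

def dfs (grid : List (List String)) (visited : List (List Bool)) (row : Int) (col : Int) (path : List String) : Option Bool :=
  (dfsAF grid (countFalse visited + 1) visited row col path).1

-- ===== PORT B =====
-- a genuine mark strictly decreases the number of False flags (termination of B's loop)
theorem count_set_true_lt :
    ∀ (l : List Bool) (j : Nat), l[j]? = some false → (l.set j true).count false < l.count false := by
  intro l
  induction l with
  | nil => intro j h; simp at h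
  | cons a t ih =>
    intro j h
    cases j with
    | zero =>
      simp only [List.getElem?_cons_zero, Option.some.injEq] at h
      subst h
      simp
    | succ j =>
      simp only [List.getElem?_cons_succ] at h
      have := ih j h
      simp only [List.set_cons_succ, List.count_cons]
      omega

theorem countFalse_set_lt :
    ∀ (v : List (List Bool)) (i : Nat) (row newRow : List Bool), v[i]? = some row →
      newRow.count false < row.count false →
      countFalse (v.set i newRow) < countFalse v := by
  intro v
  induction v with
  | nil => intro i row newRow h; simp at h
  | cons a t ih =>
    intro i row newRow h hlt
    cases i with
    | zero =>
      simp only [List.getElem?_cons_zero, Option.some.injEq] at h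
      subst h
      simpa [countFalse] using hlt
    | succ i =>
      simp only [List.getElem?_cons_succ] at h
      have := ih i row newRow h hlt
      simp only [List.set_cons_succ, countFalse, List.map_cons, List.sum_cons] at this ⊢
      omega

theorem countFalse_mark_lt (v : List (List Bool)) (r c : Int)
    (hr : 1 ≤ r) (hc : 1 ≤ c) (hv : visCell v r c = false) :
    countFalse (mark v r c) < countFalse v := by
  obtain ⟨i, rfl⟩ : ∃ i : Nat, r = (i : Int) := ⟨r.toNat, (Int.toNat_of_nonneg (by omega)).symm⟩
  obtain ⟨j, rfl⟩ : ∃ j : Nat, c = (j : Int) := ⟨c.toNat, (Int.toNat_of_nonneg (by omega)).symm⟩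
  simp only [visCell, PySem.List.pyGet?_natCast] at hv
  rcases hrow : v[i]? with _ | row
  · rw [hrow] at hv; simp at hv
  rw [hrow] at hv
  simp only [Option.bind_some] at hv
  rcases hcell : row[j]? with _ | b
  · rw [hcell] at hv; simp at hv
  rw [hcell] at hv
  simp only [Option.getD_some] at hv
  subst hv
  have hgd : PySem.List.pyGetD v (i : Int) ([] : List Bool) = row := by
    simp [PySem.List.pyGetD_natCast, List.getD, hrow]
  simp only [mark, PySem.List.pySetD_natCast, hgd]
  exact countFalse_set_lt v i row (row.set j true) hrow (count_set_true_lt row j hcell)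

-- the while loop of B: pop a cell; target ⇒ True, valid ⇒ mark it and push its R,D,L,U neighbours
-- (R on top, popped first); otherwise skip.  Parent links/path reconstruction of Source B only feed the
-- mutated `path`, never the return value, and are not modelled.
def loopB (g : List (List String)) (v : List (List Bool)) (stack : List (Int × Int)) : Option Bool :=
  match stack with
  | [] => some false
  | (r, c) :: rest =>
    if r = (g.length : Int) - 2 ∧ c = ((g.headD []).length : Int) - 2 then some true
    else if h : isValidMove g v r c = true then
      loopB g (mark v r c) ((r, c+1) :: (r+1, c) :: (r, c-1) :: (r-1, c) :: rest)
    else loopB g v rest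
termination_by (countFalse v, stack.length)
decreasing_by
  · have h' : (1 ≤ r ∧ 1 ≤ c) ∧ visCell v r c = false := by
      simp only [isValidMove, Bool.and_eq_true, decide_eq_true_eq, Bool.not_eq_true'] at h
      exact ⟨⟨h.1.1.1.1, h.1.1.2.1⟩, h.2⟩
    exact Prod.Lex.left _ _ (countFalse_mark_lt v r c h'.1.1 h'.1.2 h'.2)
  · exact Prod.Lex.right _ (by simp)

def dfs_alt (grid : List (List String)) (visited : List (List Bool)) (row : Int) (col : Int) (path : List String) : Option Bool :=
  if row = (grid.length : Int) - 2 ∧ col = ((grid.headD []).length : Int) - 2 then some true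
  else if isValidMove grid visited row col then loopB grid visited [(row, col)]
  else none

-- ===== PRECONDITION & SPEC =====
-- Pre_ excludes the inputs where Python raises IndexError — the empty grid, and ragged/mis-shaped
-- grid/visited lists whose short rows the search can touch; the rectangular-shape disjunct is
-- conservative, so a few ragged inputs on which the search happens to stay on well-formed cells
-- (and A returns) are excluded as well.
def Pre_dfs (grid : List (List String)) (visited : List (List Bool)) (row : Int) (col : Int) (path : List String) : Prop :=
  grid ≠ [] ∧
  ( (row = (grid.length : Int) - 2 ∧ col = ((grid.headD []).length : Int) - 2)  -- start is the target: A returns at once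
    ∨ (row < 1 ∨ (grid.length : Int) - 1 ≤ row ∨ col < 1 ∨ ((grid.headD []).length : Int) - 1 ≤ col)  -- start out of bounds: A returns at once
    ∨ (col.toNat < (grid.getD row.toNat []).length ∧
        ((grid.getD row.toNat []).getD col.toNat "" ≠ "0" ∨
         (row.toNat < visited.length ∧ col.toNat < (visited.getD row.toNat []).length ∧
          (visited.getD row.toNat []).getD col.toNat false = true)))  -- start is a wall / already visited, lookups in range
    ∨ ((∀ rw ∈ grid, rw.length = (grid.headD []).length) ∧ visited.length = grid.length ∧
        (∀ rw ∈ visited, rw.length = (grid.headD []).length)) )  -- rectangular maze with matching visited: every access in range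
instance (grid : List (List String)) (visited : List (List Bool)) (row : Int) (col : Int) (path : List String) : Decidable (Pre_dfs grid visited row col path) := by unfold Pre_dfs; infer_instance

def pvWitness_dfs : List (List String) × List (List Bool) × Int × Int × List String :=
  ([["1","0","1"],["1","0","1"],["1","1","1"]],
   [[false,false,false],[false,false,false],[false,false,false]], 1, 1, [])

def Spec_dfs (grid : List (List String)) (visited : List (List Bool)) (row : Int) (col : Int) (path : List String) (out : Option Bool) : Prop := out = dfs_alt grid visited row col path
instance (grid : List (List String)) (visited : List (List Bool)) (row : Int) (col : Int) (path : List String) (out : Option Bool) : Decidable (Spec_dfs grid visited row col path out) := by unfold Spec_dfs; infer_instance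

-- ===== CLAIM (what is proved, stated in full; the proofs are below) =====
def Claim_equal_dfs : Prop := ∀ (grid : List (List String)) (visited : List (List Bool)) (row : Int) (col : Int) (path : List String), Dom_dfs grid visited row col path → Pre_dfs grid visited row col path → Spec_dfs grid visited row col path (dfs grid visited row col path)

-- ===== LEMMAS AND PROOFS =====

theorem valid_parts {g : List (List String)} {v : List (List Bool)} {r c : Int}
    (h : isValidMove g v r c = true) : 1 ≤ r ∧ 1 ≤ c ∧ visCell v r c = false := by
  simp only [isValidMove, Bool.and_eq_true, decide_eq_true_eq, Bool.not_eq_true'] at h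
  exact ⟨h.1.1.1.1, h.1.1.2.1, h.2⟩

theorem dfsAF_mono (g : List (List String)) :
    ∀ (f : Nat) (v : List (List Bool)) (r c : Int) (p : List String),
      countFalse (dfsAF g f v r c p).2.1 ≤ countFalse v := by
  intro f
  induction f with
  | zero => intro v r c p; simp [dfsAF]
  | succ f ih =>
    intro v r c p
    simp only [dfsAF]
    split_ifs with h1 h2 h3 h4 h5 h6 <;>
      first
        | exact le_rfl
        | (obtain ⟨hr, hc, hvis⟩ := valid_parts h2
           have h0 := (countFalse_mark_lt v r c hr hc hvis).le
           first
             | exact (ih _ _ _ _).trans h0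
             | exact (ih _ _ _ _).trans ((ih _ _ _ _).trans h0)
             | exact (ih _ _ _ _).trans ((ih _ _ _ _).trans ((ih _ _ _ _).trans h0))
             | exact (ih _ _ _ _).trans ((ih _ _ _ _).trans ((ih _ _ _ _).trans ((ih _ _ _ _).trans h0))))

theorem loopB_nil (g : List (List String)) (v : List (List Bool)) : loopB g v [] = some false := by
  rw [loopB]

theorem loopB_cons (g : List (List String)) (v : List (List Bool)) (r c : Int) (rest : List (Int × Int)) :
    loopB g v ((r, c) :: rest) =
      if r = (g.length : Int) - 2 ∧ c = ((g.headD []).length : Int) - 2 then some true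
      else if isValidMove g v r c = true then
        loopB g (mark v r c) ((r, c+1) :: (r+1, c) :: (r, c-1) :: (r-1, c) :: rest)
      else loopB g v rest := by
  rw [loopB]
  simp only [dite_eq_ite]

theorem loopB_sim (g : List (List String)) :
    ∀ (f : Nat) (v : List (List Bool)) (r c : Int) (rest : List (Int × Int)) (p : List String),
      countFalse v < f →
      loopB g v ((r, c) :: rest) =
        (if (dfsAF g f v r c p).1 = some true then some true
         else loopB g (dfsAF g f v r c p).2.1 rest) := by
  intro f
  induction f with
  | zero => intro v r c rest p hf; omega
  | succ f ih =>
    intro v r c rest p hf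
    rw [loopB_cons]
    by_cases h1 : (r = (g.length : Int) - 2 ∧ c = ((g.headD []).length : Int) - 2)
    · simp only [dfsAF, if_pos h1]
      simp
    · by_cases h2 : isValidMove g v r c = true
      · simp only [dfsAF, if_neg h1, if_pos h2]
        obtain ⟨hr, hc, hvis⟩ := valid_parts h2
        have h0 := countFalse_mark_lt v r c hr hc hvis
        have hRm := dfsAF_mono g f (mark v r c) r (c+1) p
        rw [ih (mark v r c) r (c+1) ((r+1,c) :: (r,c-1) :: (r-1,c) :: rest) p (by omega)]
        set R := dfsAF g f (mark v r c) r (c+1) p with hRdef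
        by_cases h3 : R.1 = some true
        · simp [h3]
        · simp only [if_neg h3]
          have hDm := dfsAF_mono g f R.2.1 (r+1) c R.2.2
          rw [ih R.2.1 (r+1) c ((r,c-1) :: (r-1,c) :: rest) R.2.2 (by omega)]
          set D := dfsAF g f R.2.1 (r+1) c R.2.2 with hDdef
          by_cases h4 : D.1 = some true
          · simp [h4]
          · simp only [if_neg h4]
            have hLm := dfsAF_mono g f D.2.1 r (c-1) D.2.2
            rw [ih D.2.1 r (c-1) ((r-1,c) :: rest) D.2.2 (by omega)]
            set L := dfsAF g f D.2.1 r (c-1) D.2.2 with hLdef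
            by_cases h5 : L.1 = some true
            · simp [h5]
            · simp only [if_neg h5]
              have hUm := dfsAF_mono g f L.2.1 (r-1) c L.2.2
              rw [ih L.2.1 (r-1) c rest L.2.2 (by omega)]
              set U := dfsAF g f L.2.1 (r-1) c L.2.2 with hUdef
              by_cases h6 : U.1 = some true
              · simp [h6]
              · simp [h6]
      · simp only [dfsAF, if_neg h1, if_neg h2]
        simp

theorem dfsAF_valid_shape (g : List (List String)) (f : Nat) (v : List (List Bool)) (r c : Int) (p : List String)
    (h1 : ¬(r = (g.length : Int) - 2 ∧ c = ((g.headD []).length : Int) - 2))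
    (h2 : isValidMove g v r c = true) :
    (dfsAF g (f+1) v r c p).1 = some true ∨ (dfsAF g (f+1) v r c p).1 = some false := by
  simp only [dfsAF, if_neg h1, if_pos h2]
  split_ifs <;> simp

theorem dfs_eq_alt (g : List (List String)) (v : List (List Bool)) (r c : Int) (p : List String) :
    dfs g v r c p = dfs_alt g v r c p := by
  unfold dfs dfs_alt
  by_cases h1 : (r = (g.length : Int) - 2 ∧ c = ((g.headD []).length : Int) - 2)
  · simp only [dfsAF, if_pos h1]
  · by_cases h2 : isValidMove g v r c = true
    · rw [if_neg h1, if_pos h2]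
      rw [loopB_sim g (countFalse v + 1) v r c [] p (by omega)]
      rcases dfsAF_valid_shape g (countFalse v) v r c p h1 h2 with h | h
      · rw [h]; simp
      · rw [h]; simp [loopB_nil]
    · simp only [dfsAF, if_neg h1, if_neg h2]

-- ===== VERDICT (by name: the statement is the Claim_ definition above) =====
theorem dfs_spec : Claim_equal_dfs := by
  intro grid visited row col path _ _
  exact dfs_eq_alt grid visited row col path
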